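-- pv_equiv track=rewrite | github.com/actcheng/leetcode-solutions | 1103_Distribute_Candies_to_People.py | distributeCandies
-- ===== SOURCE A (Python) =====
-- from typing import List
--
-- def distributeCandies(candies: int, num_people: int) -> List[int]:
--
--     res = [0 for _ in range(num_people)]
--
--     give = 1
--     i = 0
--     while candies > give:
--         res[i] += give
--         candies -= give
--         give += 1
--         i += 1
--         if i == num_people: i = 0
--
--     res[i] += candies
--
--     return res
-- ===== SOURCE B (Python) =====
-- from math import isqrt
--
-- def distributeCandies(candies: int, num_people: int):
--     n = num_people
--     # k = number of full gifts handed out (smallest k >= 0 with (k+1)(k+2)/2 >= candies)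
--     if candies <= 1:
--         k = 0
--     else:
--         m0 = (isqrt(8 * candies + 1) - 1) // 2     # largest m with m(m+1)/2 <= candies
--         k = m0 - 1 if m0 * (m0 + 1) // 2 == candies else m0
--     q, r = divmod(k, n)
--     res = []
--     for p in range(n):
--         m = q + 1 if p < r else q                  # how many full gifts person p received
--         res.append(m * (p + 1) + n * m * (m - 1) // 2)
--     res[k % n] += candies - k * (k + 1) // 2       # the final (partial or short) gift
--     return res
-- ===== Notes on version B (the rewrite author's own statement) =====
-- stated objective: alternative
-- what changed: Replaces A's per-gift simulation loop by a closed form: the number of full gifts is computed with one integer square root and each person's total is an arithmetic-progression sum (no per-gift iteration).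
-- outside the precondition, e.g. on distributeCandies(10, 0): A raises IndexError, B raises ZeroDivisionError
import Mathlib
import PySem

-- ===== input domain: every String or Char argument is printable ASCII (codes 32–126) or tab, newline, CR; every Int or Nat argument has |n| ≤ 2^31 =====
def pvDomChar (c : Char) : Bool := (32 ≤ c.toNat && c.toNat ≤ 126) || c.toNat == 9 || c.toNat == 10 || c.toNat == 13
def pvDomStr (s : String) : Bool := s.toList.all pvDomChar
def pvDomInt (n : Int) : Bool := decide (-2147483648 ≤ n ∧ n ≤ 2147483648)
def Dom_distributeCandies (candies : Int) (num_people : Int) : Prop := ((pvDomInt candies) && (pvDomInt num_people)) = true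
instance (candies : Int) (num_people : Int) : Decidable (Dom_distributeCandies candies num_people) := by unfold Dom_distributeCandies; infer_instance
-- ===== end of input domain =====

-- B computes the distribution in closed form (an integer square root counts the full gifts,
-- then an arithmetic-progression sum per person) instead of simulating A's per-gift loop.

-- ===== PORT A =====
-- res[i] += v  (under Pre_ the index is always in range where this is used)
def pvAddAt (res : List Int) (i : Nat) (v : Int) : List Int :=
  res.set i (res.getD i 0 + v)

-- A's while loop; fuel = candies.toNat is always sufficient (the loop runs at most
-- candies - 1 times since every pass subtracts give ≥ 1 while candies > give).
def pvLoopA (n : Int) : Nat → Int → Int → Nat → List Int → List Int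
  | 0, c, _give, i, res => pvAddAt res i c
  | fuel+1, c, give, i, res =>
    if give < c then
      pvLoopA n fuel (c - give) (give + 1)
        (if ((i : Int) + 1) = n then 0 else i + 1) (pvAddAt res i give)
    else
      pvAddAt res i c

def distributeCandies (candies : Int) (num_people : Int) : List Int :=
  pvLoopA num_people candies.toNat candies 1 0 (List.replicate num_people.toNat 0)

-- ===== PORT B =====
def distributeCandies_alt (candies : Int) (num_people : Int) : List Int :=
  let n := num_people
  let k : Int :=
    if candies ≤ 1 then 0
    else
      let m0 := PySem.Int.floordiv ((Nat.sqrt (8 * candies + 1).toNat : Int) - 1) 2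
      if PySem.Int.floordiv (m0 * (m0 + 1)) 2 = candies then m0 - 1 else m0
  let q := PySem.Int.floordiv k n
  let r := PySem.Int.mod k n
  let res := (List.range n.toNat).map (fun (p : Nat) =>
    let m : Int := if (p : Int) < r then q + 1 else q
    m * ((p : Int) + 1) + PySem.Int.floordiv (n * m * (m - 1)) 2)
  pvAddAt res (PySem.Int.mod k n).toNat (candies - PySem.Int.floordiv (k * (k + 1)) 2)

-- ===== PRECONDITION & SPEC =====
-- Pre_ excludes only num_people ≤ 0, on which A always raises IndexError (res is empty).
def Pre_distributeCandies (candies : Int) (num_people : Int) : Prop := 1 ≤ num_people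
instance (candies : Int) (num_people : Int) : Decidable (Pre_distributeCandies candies num_people) := by
  unfold Pre_distributeCandies; infer_instance

def pvWitness_distributeCandies : Int × Int := (7, 3)

def Spec_distributeCandies (candies : Int) (num_people : Int) (out : List Int) : Prop := out = distributeCandies_alt candies num_people
instance (candies : Int) (num_people : Int) (out : List Int) : Decidable (Spec_distributeCandies candies num_people out) := by unfold Spec_distributeCandies; infer_instance

-- ===== CLAIM (what is proved, stated in full; the proofs are below) =====
def Claim_equal_distributeCandies : Prop := ∀ (candies : Int) (num_people : Int), Dom_distributeCandies candies num_people → Pre_distributeCandies candies num_people → Spec_distributeCandies candies num_people (distributeCandies candies num_people)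

-- ===== LEMMAS AND PROOFS =====

-- T s = 1 + 2 + ⋯ + s : candies consumed by the first s (full) gifts.
def pvT : Nat → Int
  | 0 => 0
  | s+1 => pvT s + (s + 1)

theorem pvT_double (s : Nat) : 2 * pvT s = (s : Int) * (s + 1) := by
  induction s with
  | zero => simp [pvT]
  | succ m ih => simp only [pvT]; push_cast; push_cast at ih; ring_nf; ring_nf at ih; omega

theorem pvT_ge (s : Nat) : (s : Int) ≤ pvT s := by
  induction s with
  | zero => simp [pvT]
  | succ m ih => simp only [pvT]; push_cast; omega

theorem pvT_mono {a b : Nat} (h : a ≤ b) : pvT a ≤ pvT b := by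
  induction b with
  | zero => have : a = 0 := by omega
            simp [this]
  | succ m ih =>
    rcases Nat.lt_or_ge a (m+1) with h1 | h1
    · have := ih (by omega)
      simp only [pvT]; push_cast; omega
    · have : a = m + 1 := by omega
      simp [this]

theorem pv_mod_succ (N s : Nat) (hN : 0 < N) :
    (s + 1) % N = if s % N + 1 = N then 0 else s % N + 1 := by
  have h1 : (s + 1) % N = (s % N + 1) % N := by
    conv_lhs => rw [← Nat.mod_add_div s N]
    rw [Nat.add_right_comm]
    exact Nat.add_mul_mod_self_left _ N (s / N)
  have h2 : s % N < N := Nat.mod_lt _ hN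
  by_cases h : s % N + 1 = N
  · simp [h1, h, Nat.mod_self]
  · rw [h1, if_neg h, Nat.mod_eq_of_lt (by omega)]

theorem pvAddAt_length (res : List Int) (i : Nat) (v : Int) :
    (pvAddAt res i v).length = res.length := by simp [pvAddAt]

theorem pvAddAt_getD (res : List Int) (i : Nat) (v : Int) (hi : i < res.length) (p : Nat)
    (hp : p < res.length) :
    (pvAddAt res i v).getD p 0 = if p = i then res.getD p 0 + v else res.getD p 0 := by
  unfold pvAddAt
  by_cases h : p = i
  · subst h
    simp [List.getD_eq_getElem?_getD, List.getElem?_set, hi, List.getElem?_eq_getElem hp]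
  · simp [List.getD_eq_getElem?_getD, List.getElem?_set, h,
      show i ≠ p from fun hc => h hc.symm]

-- gifts s+1, s+2, …, s+d applied in order (gift g goes to person (g-1) % N)
def pvGiftSeq (N : Nat) (res : List Int) (s : Nat) : Nat → List Int
  | 0 => res
  | d+1 => pvGiftSeq N (pvAddAt res (s % N) ((s : Int) + 1)) (s + 1) d

theorem pvGiftSeq_length (N : Nat) : ∀ (d : Nat) (res : List Int) (s : Nat),
    (pvGiftSeq N res s d).length = res.length := by
  intro d
  induction d with
  | zero => intro res s; rfl
  | succ d ih => intro res s; simp [pvGiftSeq, ih, pvAddAt_length]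

theorem pvGiftSeq_snoc (N : Nat) : ∀ (d : Nat) (res : List Int) (s : Nat),
    pvGiftSeq N res s (d+1) = pvAddAt (pvGiftSeq N res s d) ((s + d) % N) ((s : Int) + d + 1) := by
  intro d
  induction d with
  | zero => intro res s; simp [pvGiftSeq]
  | succ d ih =>
    intro res s
    rw [show pvGiftSeq N res s (d+1+1)
          = pvGiftSeq N (pvAddAt res (s % N) ((s : Int) + 1)) (s+1) (d+1) from rfl, ih,
      show s + 1 + d = s + (d + 1) from by omega]
    congr 1
    push_cast; ring

-- how many of the gifts 1..k went to person p, and their total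
def pvCG (N : Nat) : Nat → Nat → Nat
  | 0, _ => 0
  | k+1, p => pvCG N k p + (if p = k % N then 1 else 0)

def pvSumG (N : Nat) : Nat → Nat → Int
  | 0, _ => 0
  | k+1, p => pvSumG N k p + (if p = k % N then (k : Int) + 1 else 0)

theorem pv_succ_div_mod (N k : Nat) (hN : 0 < N) :
    ((k+1) / N = if k % N + 1 = N then k / N + 1 else k / N) ∧
    ((k+1) % N = if k % N + 1 = N then 0 else k % N + 1) := by
  have hm := pv_mod_succ N k hN
  refine ⟨?_, hm⟩
  have e1 : N * (k / N) + k % N = k := Nat.div_add_mod k N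
  have e2 : N * ((k+1) / N) + (k+1) % N = k + 1 := Nat.div_add_mod (k+1) N
  by_cases h : k % N + 1 = N
  · rw [if_pos h]
    rw [hm, if_pos h] at e2
    have : N * ((k+1) / N) = N * (k / N + 1) := by
      rw [Nat.mul_add, Nat.mul_one]; omega
    exact Nat.eq_of_mul_eq_mul_left hN this
  · rw [if_neg h]
    rw [hm, if_neg h] at e2
    have : N * ((k+1) / N) = N * (k / N) := by omega
    exact Nat.eq_of_mul_eq_mul_left hN this

theorem pvCG_div (N : Nat) (hN : 0 < N) (p : Nat) (hp : p < N) :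
    ∀ k, pvCG N k p = k / N + (if p < k % N then 1 else 0) := by
  intro k
  induction k with
  | zero => simp [pvCG, Nat.zero_div]
  | succ k ih =>
    obtain ⟨hd, hm⟩ := pv_succ_div_mod N k hN
    have hklt : k % N < N := Nat.mod_lt _ hN
    simp only [pvCG, ih, hd, hm]
    split_ifs <;> omega

theorem pvSumG_closed (N : Nat) (hN : 0 < N) (p : Nat) (hp : p < N) :
    ∀ k, 2 * pvSumG N k p =
      2 * (pvCG N k p : Int) * ((p : Int) + 1) + (N : Int) * (pvCG N k p) * ((pvCG N k p : Int) - 1) := by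
  intro k
  induction k with
  | zero => simp [pvSumG, pvCG]
  | succ k ih =>
    by_cases h : p = k % N
    · have hcg : pvCG N k p = k / N := by
        rw [pvCG_div N hN p hp k, if_neg (by omega)]; omega
      have hNk : (N : Int) * (pvCG N k p : Int) = (k : Int) - p := by
        have h2 : N * (k / N) + p = k := by rw [h]; exact Nat.div_add_mod k N
        have h3 := congrArg (Nat.cast : Nat → Int) h2
        rw [Nat.cast_add, Nat.cast_mul] at h3
        rw [hcg]
        linarith [h3]
      simp only [pvSumG, pvCG, if_pos h]
      push_cast
      linear_combination ih - 2 * hNk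
    · simp only [pvSumG, pvCG, if_neg h]
      push_cast
      linear_combination ih

theorem pvGiftSeq_getD (N : Nat) (hN : 0 < N) (p : Nat) (hp : p < N) :
    ∀ k, (pvGiftSeq N (List.replicate N (0 : Int)) 0 k).getD p 0 = pvSumG N k p := by
  intro k
  induction k with
  | zero => simp [pvGiftSeq, pvSumG, List.getD_eq_getElem?_getD, List.getElem?_replicate, hp]
  | succ k ih =>
    have hlen : (pvGiftSeq N (List.replicate N (0 : Int)) 0 k).length = N := by
      simp [pvGiftSeq_length]
    rw [pvGiftSeq_snoc]
    have hmod : k % N < N := Nat.mod_lt _ hN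
    rw [pvAddAt_getD _ _ _ (by rw [hlen]; simpa using hmod) p (by omega)]
    simp only [pvSumG, ih]
    have : (0 : Nat) + k = k := by omega
    rw [this]
    split_ifs <;> simp

-- ===== A's loop reaches the canonical form =====
theorem pvLoopA_run (n : Int) (N : Nat) (hn : (N : Int) = n) (hN : 0 < N) (c : Int) (k : Nat)
    (hhi : c ≤ pvT (k+1)) (hlo : 1 ≤ k → pvT k < c) :
    ∀ (d s fuel : Nat) (res : List Int), s + d = k → d ≤ fuel →
    pvLoopA n fuel (c - pvT s) ((s : Int) + 1) (s % N) res
      = pvAddAt (pvGiftSeq N res s d) (k % N) (c - pvT k) := by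
  intro d
  induction d with
  | zero =>
    intro s fuel res hs hf
    have hsk : s = k := by omega
    subst hsk
    have hstop : ¬ ((s : Int) + 1 < c - pvT s) := by
      have : c ≤ pvT s + (s + 1) := by simpa [pvT] using hhi
      push_cast at this ⊢; omega
    cases fuel with
    | zero => simp [pvLoopA, pvGiftSeq]
    | succ f => simp [pvLoopA, pvGiftSeq, if_neg hstop]
  | succ d ih =>
    intro s fuel res hs hf
    have hk1 : 1 ≤ k := by omega
    have hgo : (s : Int) + 1 < c - pvT s := by
      have h1 : pvT (s+1) ≤ pvT k := pvT_mono (by omega)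
      have h2 : pvT k < c := hlo hk1
      have : pvT s + (s + 1) < c := by
        have := h1; simp only [pvT] at this; push_cast at this ⊢; omega
      omega
    cases fuel with
    | zero => omega
    | succ f =>
      simp only [pvLoopA, if_pos hgo]
      have hidx : (if ((s % N : Nat) : Int) + 1 = n then 0 else s % N + 1) = (s+1) % N := by
        rw [pv_mod_succ N s hN]
        by_cases h : s % N + 1 = N
        · rw [if_pos h, if_pos (by rw [← hn]; exact_mod_cast congrArg (Nat.cast : Nat → Int) h)]
        · rw [if_neg h, if_neg (by rw [← hn]; intro hc; apply h; exact_mod_cast hc)]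
      have hc' : c - pvT s - ((s : Int) + 1) = c - pvT (s+1) := by
        simp only [pvT]; push_cast; ring
      have hg' : (s : Int) + 1 + 1 = ((s+1 : Nat) : Int) + 1 := by push_cast; ring
      rw [hidx, hc', hg']
      exact ih (s+1) f (pvAddAt res (s % N) ((s : Int) + 1)) (by omega) (by omega)

theorem distributeCandies_closed (c n : Int) (N : Nat) (hn : (N : Int) = n) (hN : 0 < N) (k : Nat)
    (hhi : c ≤ pvT (k+1)) (hlo : 1 ≤ k → pvT k < c) :
    distributeCandies c n
      = pvAddAt (pvGiftSeq N (List.replicate N 0) 0 k) (k % N) (c - pvT k) := by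
  have hfuel : k ≤ c.toNat := by
    rcases Nat.eq_zero_or_pos k with h | h
    · omega
    · have h1 : pvT k < c := hlo h
      have h2 : (k : Int) ≤ pvT k := pvT_ge k
      omega
  have hNn : n.toNat = N := by omega
  have := pvLoopA_run n N hn hN c k hhi hlo k 0 c.toNat (List.replicate N 0) (by omega) hfuel
  simpa [distributeCandies, pvT, Nat.zero_mod, hNn] using this

-- B's selected gift count, named so it can be reasoned about
def pvKB (c : Int) : Int :=
  if c ≤ 1 then 0
  else
    let m0 := PySem.Int.floordiv ((Nat.sqrt (8 * c + 1).toNat : Int) - 1) 2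
    if PySem.Int.floordiv (m0 * (m0 + 1)) 2 = c then m0 - 1 else m0

theorem pvKB_eq (c : Int) (hc : ¬ c ≤ 1) :
    pvKB c =
      (if (((Nat.sqrt (8 * c + 1).toNat : Int) - 1) / 2) * ((((Nat.sqrt (8 * c + 1).toNat : Int) - 1) / 2) + 1) / 2 = c
       then (((Nat.sqrt (8 * c + 1).toNat : Int) - 1) / 2) - 1
       else (((Nat.sqrt (8 * c + 1).toNat : Int) - 1) / 2)) := by
  simp only [pvKB, if_neg hc, PySem.Int.floordiv_eq_ediv_of_pos (by norm_num : (0:Int) < 2)]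

theorem pvKB_spec (c : Int) :
    0 ≤ pvKB c ∧ c ≤ pvT ((pvKB c).toNat + 1) ∧ (1 ≤ (pvKB c).toNat → pvT (pvKB c).toNat < c) := by
  by_cases hc : c ≤ 1
  · have h0 : pvKB c = 0 := by simp [pvKB, if_pos hc]
    refine ⟨by omega, ?_, by simp [h0]⟩
    simp only [h0]
    show c ≤ pvT 1
    simp [pvT]; omega
  · have hc2 : 2 ≤ c := by omega
    have hac : (((8 * c + 1).toNat : Nat) : Int) = 8 * c + 1 := by omega
    set s : Nat := Nat.sqrt (8 * c + 1).toNat with hs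
    have h1 : (s : Int) * (s : Int) ≤ 8 * c + 1 := by
      have h := Nat.sqrt_le' (8 * c + 1).toNat
      have h2' : s * s ≤ (8 * c + 1).toNat := by simpa [Nat.pow_two] using h
      rw [← hac]; exact_mod_cast h2'
    have h2 : 8 * c + 1 < ((s : Int) + 1) * ((s : Int) + 1) := by
      have h := Nat.lt_succ_sqrt' (8 * c + 1).toNat
      have h3' : (8 * c + 1).toNat < (s + 1) * (s + 1) := by
        simpa [Nat.pow_two, Nat.succ_eq_add_one] using h
      rw [← hac]; exact_mod_cast h3'
    have hs4 : (4 : Int) ≤ (s : Int) := by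
      by_contra hcon
      push_neg at hcon
      nlinarith [h2, hc2]
    set m0 : Int := ((s : Int) - 1) / 2 with hm0
    have hm0b : 2 * m0 ≤ (s : Int) - 1 ∧ (s : Int) - 1 < 2 * m0 + 2 := by omega
    have hm01 : 1 ≤ m0 := by omega
    have hsqA : (2 * m0 + 1) * (2 * m0 + 1) ≤ (s : Int) * (s : Int) :=
      mul_le_mul (by omega) (by omega) (by omega) (by omega)
    have hsqB : ((s : Int) + 1) * ((s : Int) + 1) ≤ (2 * m0 + 3) * (2 * m0 + 3) :=
      mul_le_mul (by omega) (by omega) (by omega) (by omega)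
    have hA : m0 * (m0 + 1) ≤ 2 * c := by nlinarith [hsqA, h1]
    have hB : 2 * c < (m0 + 1) * (m0 + 2) := by nlinarith [hsqB, h2]
    obtain ⟨rr, hrr⟩ : ∃ rr, m0 * (m0 + 1) = rr + rr := (Int.even_mul_succ_self m0)
    have hhalf : m0 * (m0 + 1) / 2 = rr := by omega
    rw [pvKB_eq c hc]
    by_cases heq : m0 * (m0 + 1) / 2 = c
    · rw [if_pos heq]
      have h2c : 2 * c = m0 * (m0 + 1) := by omega
      have ht1 : (((m0 - 1).toNat + 1 : Nat) : Int) = m0 := by omega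
      have ht2 : (((m0 - 1).toNat : Nat) : Int) = m0 - 1 := by omega
      refine ⟨by omega, ?_, ?_⟩
      · have hd := pvT_double ((m0 - 1).toNat + 1)
        rw [ht1] at hd
        linarith [hd]
      · intro _
        have hd := pvT_double ((m0 - 1).toNat)
        rw [ht2] at hd
        nlinarith [hd, hm01]
    · rw [if_neg heq]
      have hlt : m0 * (m0 + 1) < 2 * c := by omega
      have ht1 : ((m0.toNat + 1 : Nat) : Int) = m0 + 1 := by omega
      have ht2 : ((m0.toNat : Nat) : Int) = m0 := by omega
      refine ⟨by omega, ?_, ?_⟩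
      · have hd := pvT_double (m0.toNat + 1)
        rw [ht1] at hd
        nlinarith [hd, hB]
      · intro _
        have hd := pvT_double (m0.toNat)
        rw [ht2] at hd
        linarith [hd]

theorem distributeCandies_alt_closed (c n : Int) (N : Nat) (hn : (N : Int) = n) (hN : 0 < N) :
    distributeCandies_alt c n
      = pvAddAt (pvGiftSeq N (List.replicate N 0) 0 (pvKB c).toNat)
          (((pvKB c).toNat) % N) (c - pvT (pvKB c).toNat) := by
  obtain ⟨hk0, hhi, hlo⟩ := pvKB_spec c
  set k : Nat := (pvKB c).toNat with hkdef
  have hkc : ((k : Nat) : Int) = pvKB c := by omega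
  have hnpos : (0 : Int) < n := by omega
  have hBdef : distributeCandies_alt c n
      = pvAddAt ((List.range n.toNat).map (fun (p : Nat) =>
          (if (p : Int) < PySem.Int.mod (pvKB c) n then PySem.Int.floordiv (pvKB c) n + 1
           else PySem.Int.floordiv (pvKB c) n) * ((p : Int) + 1) +
          PySem.Int.floordiv (n * (if (p : Int) < PySem.Int.mod (pvKB c) n then PySem.Int.floordiv (pvKB c) n + 1
           else PySem.Int.floordiv (pvKB c) n) * ((if (p : Int) < PySem.Int.mod (pvKB c) n then PySem.Int.floordiv (pvKB c) n + 1
           else PySem.Int.floordiv (pvKB c) n) - 1)) 2))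
          (PySem.Int.mod (pvKB c) n).toNat
          (c - PySem.Int.floordiv (pvKB c * (pvKB c + 1)) 2) := rfl
  have hmod : PySem.Int.mod (pvKB c) n = ((k % N : Nat) : Int) := by
    rw [PySem.Int.mod_eq_emod_of_pos hnpos, ← hkc, ← hn]
    push_cast
    ring
  have hdiv : PySem.Int.floordiv (pvKB c) n = ((k / N : Nat) : Int) := by
    rw [PySem.Int.floordiv_eq_ediv_of_pos hnpos, ← hkc, ← hn]
    push_cast
    ring
  have hT : PySem.Int.floordiv (pvKB c * (pvKB c + 1)) 2 = pvT k := by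
    rw [PySem.Int.floordiv_eq_ediv_of_pos (by norm_num : (0:Int) < 2), ← hkc,
      ← pvT_double k]
    exact Int.mul_ediv_cancel_left _ (by norm_num)
  have hNn : n.toNat = N := by omega
  rw [hBdef, hmod, hdiv, hT, hNn]
  have hidx : (((k % N : Nat) : Int)).toNat = k % N := by omega
  rw [hidx]
  congr 1
  apply List.ext_getElem
  · simp [pvGiftSeq_length]
  · intro p hp1 hp2
    have hpN : p < N := by simpa using hp1
    have hlen : (pvGiftSeq N (List.replicate N (0:Int)) 0 k).length = N := by
      simp [pvGiftSeq_length]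
    have hR : (pvGiftSeq N (List.replicate N (0:Int)) 0 k)[p] = pvSumG N k p := by
      rw [← List.getD_eq_getElem _ 0, pvGiftSeq_getD N hN p hpN k]
    rw [hR, List.getElem_map, List.getElem_range]
    have hm : (if (p : Int) < ((k % N : Nat) : Int) then ((k / N : Nat) : Int) + 1
        else ((k / N : Nat) : Int)) = ((pvCG N k p : Nat) : Int) := by
      rw [pvCG_div N hN p hpN k]
      split_ifs with h1 h2 <;> push_cast <;> omega
    rw [hm]
    have hsum := pvSumG_closed N hN p hpN k
    have heven : n * ((pvCG N k p : Nat) : Int) * (((pvCG N k p : Nat) : Int) - 1)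
        = 2 * (pvSumG N k p - ((pvCG N k p : Nat) : Int) * ((p : Int) + 1)) := by
      rw [← hn]
      linarith [hsum]
    rw [PySem.Int.floordiv_eq_ediv_of_pos (by norm_num : (0:Int) < 2), heven,
      Int.mul_ediv_cancel_left _ (by norm_num : (2:Int) ≠ 0)]
    ring

theorem distributeCandies_spec : Claim_equal_distributeCandies := by
  intro c n _hDom hPre
  have hn1 : 1 ≤ n := hPre
  have hn : ((n.toNat : Nat) : Int) = n := by omega
  have hN : 0 < n.toNat := by omega
  obtain ⟨hk0, hhi, hlo⟩ := pvKB_spec c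
  show distributeCandies c n = distributeCandies_alt c n
  rw [distributeCandies_closed c n n.toNat hn hN (pvKB c).toNat hhi hlo,
    distributeCandies_alt_closed c n n.toNat hn hN]
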